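-- pv_equiv track=rewrite | github.com/Dildz/RtV-Load-Order-Editor | mod_patcher.py | _apply_updates_patch
-- ===== SOURCE A (Python) =====
-- def _apply_updates_patch(text: str, mod_id: str) -> str:
--     """Return the mod.txt text with [updates]/modworkshop=<id> ensured.
--
--     - If the [updates] section is absent, append it at the end.
--     - If the section exists but the key is missing, insert the key right after
--       the section header.
--     - Preserves the original line ending style (\\r\\n vs \\n).
--     - Assumes caller has verified modworkshop key is not already present.
--     """
--     eol = "\r\n" if "\r\n" in text else "\n"
--     lines = text.splitlines()
--
--     section_idx = -1
--     for i, line in enumerate(lines):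
--         if line.strip().lower() == "[updates]":
--             section_idx = i
--             break
--
--     if section_idx == -1:
--         # Separate from preceding content with a blank line, matching the
--         # formatting convention most mod.txt files already use between sections.
--         if lines and lines[-1].strip() != "":
--             lines.append("")
--         lines.append("[updates]")
--         lines.append(f"modworkshop={mod_id}")
--     else:
--         lines.insert(section_idx + 1, f"modworkshop={mod_id}")
--
--     return eol.join(lines) + eol
-- ===== SOURCE B (Python) =====
-- def _apply_updates_patch(text: str, mod_id: str) -> str:
--     """Single forward pass: copy lines into a new list, inserting the key
--     right after the first [updates] header; append the section if never seen."""
--     eol = "\r\n" if "\r\n" in text else "\n"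
--     key = f"modworkshop={mod_id}"
--     out = []
--     inserted = False
--     for line in text.splitlines():
--         out.append(line)
--         if not inserted and line.strip().lower() == "[updates]":
--             out.append(key)
--             inserted = True
--     if not inserted:
--         if out and out[-1].strip() != "":
--             out.append("")
--         out.append("[updates]")
--         out.append(key)
--     return eol.join(out) + eol
-- ===== Notes on version B (the rewrite author's own statement) =====
-- stated objective: alternative
-- what changed: Replaces the index-search (enumerate + break) followed by list.insert/append with a single forward pass that builds a fresh output list with an 'inserted' flag, appending the key right after the header as it is copied.
import Mathlib
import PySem

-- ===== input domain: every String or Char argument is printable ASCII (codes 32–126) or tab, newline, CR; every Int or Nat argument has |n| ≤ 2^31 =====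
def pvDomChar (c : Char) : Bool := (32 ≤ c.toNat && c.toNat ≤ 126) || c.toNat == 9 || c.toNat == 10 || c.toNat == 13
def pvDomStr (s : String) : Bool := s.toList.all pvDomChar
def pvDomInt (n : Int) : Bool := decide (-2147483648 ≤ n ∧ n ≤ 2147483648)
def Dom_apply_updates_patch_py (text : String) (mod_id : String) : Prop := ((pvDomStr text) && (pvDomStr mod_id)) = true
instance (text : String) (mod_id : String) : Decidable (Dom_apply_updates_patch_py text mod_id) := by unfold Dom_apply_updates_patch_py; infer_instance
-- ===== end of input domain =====

-- B rebuilds the line list in one forward pass with an 'inserted' flag instead of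
-- A's index search + list.insert; same cost, different decomposition (objective: alternative).

-- ===== PORT A =====
-- the 'for i, line in enumerate(lines): if …: section_idx = i; break' loop
def pvAFind : List String → Int → Int
  | [], _ => -1
  | l :: ls, i =>
    if PySem.Str.lower (PySem.Str.strip l) = "[updates]" then i else pvAFind ls (i + 1)

def apply_updates_patch_py (text : String) (mod_id : String) : String :=
  let eol := if PySem.Str.isIn "\r\n" text then "\r\n" else "\n"
  let lines := PySem.Str.splitlines text
  let section_idx := pvAFind lines 0
  let lines' :=
    if section_idx = -1 then
      -- 'if lines and lines[-1].strip() != "": lines.append("")'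
      let lines2 :=
        if lines.getLast?.any (fun last => PySem.Str.strip last ≠ "") then lines ++ [""]
        else lines
      lines2 ++ ["[updates]", "modworkshop=" ++ mod_id]
    else
      PySem.List.insert lines (section_idx + 1) ("modworkshop=" ++ mod_id)
  PySem.Str.join eol lines' ++ eol

-- ===== PORT B =====
-- the 'for line in lines: out.append(line); if not inserted and …' loop; returns (out, inserted)
def pvBLoop (key : String) : List String → Bool → List String × Bool
  | [], ins => ([], ins)
  | l :: ls, ins =>
    if !ins && (PySem.Str.lower (PySem.Str.strip l) = "[updates]") then
      let r := pvBLoop key ls true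
      (l :: key :: r.1, r.2)
    else
      let r := pvBLoop key ls ins
      (l :: r.1, r.2)

def apply_updates_patch_py_alt (text : String) (mod_id : String) : String :=
  let eol := if PySem.Str.isIn "\r\n" text then "\r\n" else "\n"
  let key := "modworkshop=" ++ mod_id
  let p := pvBLoop key (PySem.Str.splitlines text) false
  let out :=
    if p.2 then p.1
    else
      let out1 :=
        if p.1.getLast?.any (fun last => PySem.Str.strip last ≠ "") then p.1 ++ [""]
        else p.1
      out1 ++ ["[updates]", key]
  PySem.Str.join eol out ++ eol

-- ===== PRECONDITION & SPEC =====
def Spec_apply_updates_patch_py (text : String) (mod_id : String) (out : String) : Prop := out = apply_updates_patch_py_alt text mod_id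
instance (text : String) (mod_id : String) (out : String) : Decidable (Spec_apply_updates_patch_py text mod_id out) := by unfold Spec_apply_updates_patch_py; infer_instance

-- ===== CLAIM (what is proved, stated in full; the proofs are below) =====
def Claim_equal_apply_updates_patch_py : Prop := ∀ (text : String) (mod_id : String), Dom_apply_updates_patch_py text mod_id → Spec_apply_updates_patch_py text mod_id (apply_updates_patch_py text mod_id)

-- ===== LEMMAS AND PROOFS =====

-- proof-side view of A's search: first matching index as an Option Nat
def pvFindN : List String → Option Nat
  | [] => none
  | l :: ls =>
    if PySem.Str.lower (PySem.Str.strip l) = "[updates]" then some 0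
    else (pvFindN ls).map (· + 1)

lemma pvAFind_eq (ls : List String) (i : Int) :
    pvAFind ls i = match pvFindN ls with | none => -1 | some n => i + n := by
  induction ls generalizing i with
  | nil => rfl
  | cons l ls ih =>
    by_cases h : PySem.Str.lower (PySem.Str.strip l) = "[updates]"
    · simp [pvAFind, pvFindN, h]
    · rw [show pvAFind (l :: ls) i = pvAFind ls (i + 1) from by simp [pvAFind, h]]
      rw [ih]
      cases hv : pvFindN ls with
      | none => simp [pvFindN, h, hv]
      | some v => simp [pvFindN, h, hv]; ring

lemma pvFindN_lt_length (ls : List String) (n : Nat) (h : pvFindN ls = some n) :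
    n < ls.length := by
  induction ls generalizing n with
  | nil => simp [pvFindN] at h
  | cons l ls ih =>
    by_cases hc : PySem.Str.lower (PySem.Str.strip l) = "[updates]"
    · simp [pvFindN, hc] at h; simp [← h]
    · simp [pvFindN, hc] at h
      obtain ⟨m, hm, rfl⟩ := h
      have := ih m hm
      simp only [List.length_cons]; omega

lemma pvInsert_nat (v : String) (xs : List String) (n : Nat) (h : n ≤ xs.length) :
    PySem.List.insert xs (n : Int) v = xs.take n ++ v :: xs.drop n := by
  simp only [PySem.List.insert, PySem.List.sliceIndices]
  have h1 : ¬ ((n : Int) < 0) := by omega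
  have h2 : min (n : Int) (xs.length : Int) = (n : Int) := by omega
  simp [h1, h2]

lemma pvBLoop_true (key : String) (ls : List String) :
    pvBLoop key ls true = (ls, true) := by
  induction ls with
  | nil => rfl
  | cons l ls ih => simp [pvBLoop, ih]

lemma pvBLoop_main (key : String) (ls : List String) :
    pvBLoop key ls false =
      (match pvFindN ls with
       | none => ls
       | some n => ls.take (n + 1) ++ key :: ls.drop (n + 1),
       (pvFindN ls).isSome) := by
  induction ls with
  | nil => rfl
  | cons l ls ih =>
    by_cases h : PySem.Str.lower (PySem.Str.strip l) = "[updates]"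
    · simp [pvBLoop, pvFindN, h, pvBLoop_true]
    · simp only [pvBLoop, pvFindN, h, if_false, Bool.not_false, Bool.true_and,
        decide_eq_true_eq, ih]
      cases pvFindN ls <;> simp [List.take_succ_cons, List.drop_succ_cons]

-- ===== VERDICT (by name: the statement is the Claim_ definition above) =====
theorem apply_updates_patch_py_spec : Claim_equal_apply_updates_patch_py := by
  intro text mod_id _
  unfold Spec_apply_updates_patch_py apply_updates_patch_py apply_updates_patch_py_alt
  simp only [pvBLoop_main, pvAFind_eq]
  cases hf : pvFindN (PySem.Str.splitlines text) with
  | none => simp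
  | some n =>
    have hn : n < (PySem.Str.splitlines text).length :=
      pvFindN_lt_length _ _ hf
    have h1 : ¬ ((0 : Int) + (n : Int) = -1) := by omega
    rw [if_neg h1]
    simp only [Option.isSome_some, if_true]
    have h2 : (0 : Int) + (n : Int) + 1 = ((n + 1 : Nat) : Int) := by push_cast; ring
    rw [h2, pvInsert_nat _ _ _ (by omega)]
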